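-- pv_equiv track=rewrite | github.com/tgurgick/projectHowie | howie_cli/draft/intelligence_parser.py | _determine_starter_status
-- ===== SOURCE A (Python) =====
-- def _determine_starter_status(player_name: str, summary: str) -> bool:
--     """Determine if a player is a starter based on context"""
--     player_context = summary.lower()
--     name_lower = player_name.lower()
--
--     # Strong starter indicators
--     starter_indicators = [
--         f'{name_lower} as the clear starter',
--         f'{name_lower} as the starter',
--         f'starter: {name_lower}',
--         f'{name_lower} is the clear starter',
--         f'{name_lower} is the starter',
--         f'led by {name_lower}',
--         f'{name_lower} as the wr1',
--         f'{name_lower} as the rb1',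
--         f'{name_lower} as the qb1',
--         f'{name_lower} as the te1',
--         f'{name_lower} is the wr1',
--         f'{name_lower} is the rb1',
--         f'{name_lower} is the qb1',
--         f'{name_lower} is the te1',
--         f'lead back {name_lower}',
--         f'primary back {name_lower}',
--         f'starting {name_lower}'
--     ]
--
--     # Backup indicators
--     backup_indicators = [
--         f'backup: {name_lower}',
--         f'{name_lower} as backup',
--         f'{name_lower} serves as backup',
--         f'{name_lower} serving as backup',
--         f'backed up by {name_lower}',
--         f'{name_lower} as the backup'
--     ]
--
--     # Check for starter patterns
--     for indicator in starter_indicators: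
--         if indicator in player_context:
--             return True
--
--     # Check for backup patterns
--     for indicator in backup_indicators:
--         if indicator in player_context:
--             return False
--
--     # Default to True if mentioned prominently (likely starter)
--     return True
-- ===== SOURCE B (Python) =====
-- def _determine_starter_status(player_name: str, summary: str) -> bool:
--     """Determine if a player is a starter based on context"""
--     context = summary.lower()
--     name = player_name.lower()
--     n = len(name)
--
--     # local-context classification around each occurrence of the name
--     starter_before = ['led by ', 'lead back ', 'primary back ', 'starting ', 'starter: ']
--     starter_after = [' as the clear starter', ' as the starter',
--                      ' is the clear starter', ' is the starter',
--                      ' as the wr1', ' as the rb1', ' as the qb1', ' as the te1',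
--                      ' is the wr1', ' is the rb1', ' is the qb1', ' is the te1']
--     backup_before = ['backup: ', 'backed up by ']
--     backup_after = [' as backup', ' serves as backup', ' serving as backup',
--                     ' as the backup']
--
--     is_starter = False
--     is_backup = False
--     for i in range(len(context) + 1):
--         if context[i:i + n] != name:
--             continue
--         before = context[:i]
--         after = context[i + n:]
--         if any(before.endswith(p) for p in starter_before) or \
--            any(after.startswith(s) for s in starter_after):
--             is_starter = True
--         if any(before.endswith(p) for p in backup_before) or \
--            any(after.startswith(s) for s in backup_after):
--             is_backup = True
--     return is_starter or not is_backup
-- ===== Notes on version B (the rewrite author's own statement) =====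
-- stated objective: alternative
-- what changed: Instead of building 23 full pattern strings and substring-testing each against the summary, B makes a single positional sweep over the summary, and at each occurrence of the lowered name classifies the local context with before.endswith(prefix)/after.startswith(suffix) checks against short fixed prefix/suffix fragments.
import Mathlib
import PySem

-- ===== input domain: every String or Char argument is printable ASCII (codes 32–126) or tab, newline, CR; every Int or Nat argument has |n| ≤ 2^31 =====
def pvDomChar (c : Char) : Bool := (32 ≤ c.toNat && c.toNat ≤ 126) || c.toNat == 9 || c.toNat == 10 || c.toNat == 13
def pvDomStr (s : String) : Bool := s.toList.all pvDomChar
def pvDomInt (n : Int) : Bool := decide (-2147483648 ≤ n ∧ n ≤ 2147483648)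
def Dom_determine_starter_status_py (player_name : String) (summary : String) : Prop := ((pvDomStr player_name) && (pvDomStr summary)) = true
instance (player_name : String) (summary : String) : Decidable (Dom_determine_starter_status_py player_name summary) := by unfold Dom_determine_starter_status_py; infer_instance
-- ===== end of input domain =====

-- B replaces A's 23 build-pattern-and-substring-search tests by one positional sweep
-- over the summary that classifies each occurrence of the name by its local context
-- (endswith/startswith against short fixed fragments); objective: alternative.


-- ===== PORT A =====
-- A's literal pattern lists (built from the lowered name)
def pvStarterIndicators (n : List Char) : List (List Char) :=
  [ n ++ " as the clear starter".toList
  , n ++ " as the starter".toList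
  , "starter: ".toList ++ n
  , n ++ " is the clear starter".toList
  , n ++ " is the starter".toList
  , "led by ".toList ++ n
  , n ++ " as the wr1".toList
  , n ++ " as the rb1".toList
  , n ++ " as the qb1".toList
  , n ++ " as the te1".toList
  , n ++ " is the wr1".toList
  , n ++ " is the rb1".toList
  , n ++ " is the qb1".toList
  , n ++ " is the te1".toList
  , "lead back ".toList ++ n
  , "primary back ".toList ++ n
  , "starting ".toList ++ n ]

def pvBackupIndicators (n : List Char) : List (List Char) :=
  [ "backup: ".toList ++ n
  , n ++ " as backup".toList
  , n ++ " serves as backup".toList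
  , n ++ " serving as backup".toList
  , "backed up by ".toList ++ n
  , n ++ " as the backup".toList ]

-- A's 'for … if … in …: return ret' loop: some ret at the first match, none on fall-through
def pvScanReturn (inds : List (List Char)) (ctx : List Char) (ret : Bool) : Option Bool :=
  match inds with
  | [] => none
  | i :: rest => if PySem.Chars.isIn i ctx then some ret else pvScanReturn rest ctx ret

def determine_starter_status_py (player_name : String) (summary : String) : Bool :=
  let player_context := PySem.Chars.lower summary.toList
  let name_lower := PySem.Chars.lower player_name.toList
  match pvScanReturn (pvStarterIndicators name_lower) player_context true with
  | some b => b
  | none =>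
    match pvScanReturn (pvBackupIndicators name_lower) player_context false with
    | some b => b
    | none => true

-- ===== PORT B =====
-- B's fixed local-context fragments
def pvStarterBefore : List (List Char) :=
  [ "led by ".toList, "lead back ".toList, "primary back ".toList
  , "starting ".toList, "starter: ".toList ]
def pvStarterAfter : List (List Char) :=
  [ " as the clear starter".toList, " as the starter".toList
  , " is the clear starter".toList, " is the starter".toList
  , " as the wr1".toList, " as the rb1".toList, " as the qb1".toList, " as the te1".toList
  , " is the wr1".toList, " is the rb1".toList, " is the qb1".toList, " is the te1".toList ]
def pvBackupBefore : List (List Char) :=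
  [ "backup: ".toList, "backed up by ".toList ]
def pvBackupAfter : List (List Char) :=
  [ " as backup".toList, " serves as backup".toList
  , " serving as backup".toList, " as the backup".toList ]

-- B's loop body: visit position i, classify the occurrence (if any)
def pvAltStep (ctx name : List Char) (acc : Bool × Bool) (i : Nat) : Bool × Bool :=
  if PySem.Chars.slice ctx (some (i : Int)) (some ((i : Int) + (name.length : Int))) ≠ name then
    acc
  else
    let before := PySem.Chars.slice ctx none (some (i : Int))
    let after := PySem.Chars.slice ctx (some ((i : Int) + (name.length : Int))) none
    let is_starter := acc.1 ||
      (pvStarterBefore.any (fun p => PySem.Chars.endswith before p) ||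
       pvStarterAfter.any (fun s => PySem.Chars.startswith after s))
    let is_backup := acc.2 ||
      (pvBackupBefore.any (fun p => PySem.Chars.endswith before p) ||
       pvBackupAfter.any (fun s => PySem.Chars.startswith after s))
    (is_starter, is_backup)

def determine_starter_status_py_alt (player_name : String) (summary : String) : Bool :=
  let context := PySem.Chars.lower summary.toList
  let name := PySem.Chars.lower player_name.toList
  let flags := (List.range (context.length + 1)).foldl (pvAltStep context name) (false, false)
  flags.1 || !flags.2

-- ===== PRECONDITION & SPEC =====
def Spec_determine_starter_status_py (player_name : String) (summary : String) (out : Bool) : Prop := out = determine_starter_status_py_alt player_name summary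
instance (player_name : String) (summary : String) (out : Bool) : Decidable (Spec_determine_starter_status_py player_name summary out) := by unfold Spec_determine_starter_status_py; infer_instance

-- ===== CLAIM =====
def Claim_equal_determine_starter_status_py : Prop := ∀ (player_name : String) (summary : String), Dom_determine_starter_status_py player_name summary → Spec_determine_starter_status_py player_name summary (determine_starter_status_py player_name summary)

-- ===== LEMMAS AND PROOFS =====
theorem pv_prefix_append_split (x y l : List Char) :
    (x ++ y) <+: l ↔ x <+: l ∧ y <+: l.drop x.length := by
  constructor
  · rintro ⟨t, rfl⟩
    refine ⟨(List.prefix_append x y).trans (List.prefix_append _ t), ?_⟩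
    rw [List.append_assoc, List.drop_left]
    exact List.prefix_append y t
  · rintro ⟨⟨t, rfl⟩, h2⟩
    rw [List.drop_left] at h2
    obtain ⟨u, rfl⟩ := h2
    simp

-- b <+: ctx.drop j ↔ b <:+ ctx.take (j+b.length), given j + b.length ≤ len
theorem pv_prefix_drop_iff_suffix_take (b ctx : List Char) (j : Nat) (h : j + b.length ≤ ctx.length) :
    b <+: ctx.drop j ↔ b <:+ ctx.take (j + b.length) := by
  rw [List.prefix_iff_eq_take, List.suffix_iff_eq_drop]
  have hlen : (ctx.take (j + b.length)).length = j + b.length := by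
    simp [Nat.min_eq_left h]
  rw [hlen, Nat.add_sub_cancel, List.drop_take, Nat.add_sub_cancel_left]

theorem pv_isIn_sandwich (b n a ctx : List Char) :
    PySem.Chars.isIn (b ++ n ++ a) ctx = true ↔
      ∃ i ≤ ctx.length, n <+: ctx.drop i ∧ b <:+ ctx.take i ∧ a <+: ctx.drop (i + n.length) := by
  rw [← PySem.Chars.exists_prefix_drop_iff_isIn]
  constructor
  · rintro ⟨j, hpre⟩
    have hj : ∃ j' ≤ ctx.length, (b ++ n ++ a) <+: ctx.drop j' := by
      by_cases hle : j ≤ ctx.length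
      · exact ⟨j, hle, hpre⟩
      · refine ⟨ctx.length, le_refl _, ?_⟩
        rw [List.drop_eq_nil_of_le (le_of_lt (Nat.lt_of_not_le hle))] at hpre
        rw [List.drop_length]
        exact hpre
    obtain ⟨j', hj', hpre'⟩ := hj
    rw [pv_prefix_append_split (b ++ n) a, pv_prefix_append_split b n] at hpre'
    obtain ⟨⟨hb, hn⟩, ha⟩ := hpre'
    rw [List.drop_drop] at hn
    rw [List.drop_drop, List.length_append] at ha
    have hblen : j' + b.length ≤ ctx.length := by
      have := hb.length_le
      rw [List.length_drop] at this
      omega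
    refine ⟨j' + b.length, hblen, ?_, ?_, ?_⟩
    · exact hn
    · exact (pv_prefix_drop_iff_suffix_take b ctx j' hblen).mp hb
    · rwa [show j' + b.length + n.length = j' + (b.length + n.length) by omega]
  · rintro ⟨i, hi, hn, hb, ha⟩
    have hbl : b.length ≤ i := by
      have := hb.length_le
      rw [List.length_take, Nat.min_eq_left hi] at this
      exact this
    refine ⟨i - b.length, ?_⟩
    rw [pv_prefix_append_split (b ++ n) a, pv_prefix_append_split b n]
    have hib : i - b.length + b.length = i := Nat.sub_add_cancel hbl
    refine ⟨⟨?_, ?_⟩, ?_⟩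
    · rw [pv_prefix_drop_iff_suffix_take b ctx (i - b.length) (by omega), hib]
      exact hb
    · rw [List.drop_drop, hib]
      exact hn
    · rw [List.drop_drop, List.length_append,
        show i - b.length + (b.length + n.length) = i + n.length by omega]
      exact ha

def pvPairsOf (befores afters : List (List Char)) : List (List Char × List Char) :=
  befores.map (fun p => (p, [])) ++ afters.map (fun s => ([], s))

theorem pv_any_sandwich (pairs : List (List Char × List Char)) (n ctx : List Char) :
    (pairs.any (fun pa => PySem.Chars.isIn (pa.1 ++ n ++ pa.2) ctx)) = true ↔
      ∃ i ≤ ctx.length, n <+: ctx.drop i ∧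
        ∃ pa ∈ pairs, pa.1 <:+ ctx.take i ∧ pa.2 <+: ctx.drop (i + n.length) := by
  simp only [List.any_eq_true, pv_isIn_sandwich]
  constructor
  · rintro ⟨pa, hpa, i, hi, h1, h2, h3⟩
    exact ⟨i, hi, h1, pa, hpa, h2, h3⟩
  · rintro ⟨i, hi, h1, pa, hpa, h2, h3⟩
    exact ⟨pa, hpa, i, hi, h1, h2, h3⟩

theorem pv_mem_pairsOf (bs as : List (List Char)) (t d : List Char) :
    (∃ pa ∈ pvPairsOf bs as, pa.1 <:+ t ∧ pa.2 <+: d) ↔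
      (∃ p ∈ bs, p <:+ t) ∨ (∃ s ∈ as, s <+: d) := by
  simp only [pvPairsOf, List.mem_append, List.mem_map]
  constructor
  · rintro ⟨pa, (⟨p, hp, rfl⟩ | ⟨s, hs, rfl⟩), h1, h2⟩
    · exact Or.inl ⟨p, hp, h1⟩
    · exact Or.inr ⟨s, hs, h2⟩
  · rintro (⟨p, hp, h⟩ | ⟨s, hs, h⟩)
    · exact ⟨(p, []), Or.inl ⟨p, hp, rfl⟩, h, List.nil_prefix⟩
    · exact ⟨([], s), Or.inr ⟨s, hs, rfl⟩, List.nil_suffix, h⟩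

theorem pv_starter_any_eq (n ctx : List Char) :
    (pvStarterIndicators n).any (fun p => PySem.Chars.isIn p ctx) =
      (pvPairsOf pvStarterBefore pvStarterAfter).any
        (fun pa => PySem.Chars.isIn (pa.1 ++ n ++ pa.2) ctx) := by
  apply Bool.eq_iff_iff.mpr
  simp only [pvStarterIndicators, pvStarterBefore, pvStarterAfter, pvPairsOf, List.map,
    List.any_append, List.any_cons, List.any_nil, List.append_nil, List.nil_append,
    Bool.or_eq_true, Bool.false_eq_true, or_false]
  constructor
  · rintro (h|h|h|h|h|h|h|h|h|h|h|h|h|h|h|h|h)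
    · exact Or.inr (Or.inl h)
    · exact Or.inr (Or.inr (Or.inl h))
    · exact Or.inl (Or.inr (Or.inr (Or.inr (Or.inr (h)))))
    · exact Or.inr (Or.inr (Or.inr (Or.inl h)))
    · exact Or.inr (Or.inr (Or.inr (Or.inr (Or.inl h))))
    · exact Or.inl (Or.inl h)
    · exact Or.inr (Or.inr (Or.inr (Or.inr (Or.inr (Or.inl h)))))
    · exact Or.inr (Or.inr (Or.inr (Or.inr (Or.inr (Or.inr (Or.inl h))))))
    · exact Or.inr (Or.inr (Or.inr (Or.inr (Or.inr (Or.inr (Or.inr (Or.inl h)))))))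
    · exact Or.inr (Or.inr (Or.inr (Or.inr (Or.inr (Or.inr (Or.inr (Or.inr (Or.inl h))))))))
    · exact Or.inr (Or.inr (Or.inr (Or.inr (Or.inr (Or.inr (Or.inr (Or.inr (Or.inr (Or.inl h)))))))))
    · exact Or.inr (Or.inr (Or.inr (Or.inr (Or.inr (Or.inr (Or.inr (Or.inr (Or.inr (Or.inr (Or.inl h))))))))))
    · exact Or.inr (Or.inr (Or.inr (Or.inr (Or.inr (Or.inr (Or.inr (Or.inr (Or.inr (Or.inr (Or.inr (Or.inl h)))))))))))
    · exact Or.inr (Or.inr (Or.inr (Or.inr (Or.inr (Or.inr (Or.inr (Or.inr (Or.inr (Or.inr (Or.inr (Or.inr (h))))))))))))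
    · exact Or.inl (Or.inr (Or.inl h))
    · exact Or.inl (Or.inr (Or.inr (Or.inl h)))
    · exact Or.inl (Or.inr (Or.inr (Or.inr (Or.inl h))))
  · rintro ((h|h|h|h|h)|(h|h|h|h|h|h|h|h|h|h|h|h))
    · exact Or.inr (Or.inr (Or.inr (Or.inr (Or.inr (Or.inl h)))))
    · exact Or.inr (Or.inr (Or.inr (Or.inr (Or.inr (Or.inr (Or.inr (Or.inr (Or.inr (Or.inr (Or.inr (Or.inr (Or.inr (Or.inr (Or.inl h))))))))))))))
    · exact Or.inr (Or.inr (Or.inr (Or.inr (Or.inr (Or.inr (Or.inr (Or.inr (Or.inr (Or.inr (Or.inr (Or.inr (Or.inr (Or.inr (Or.inr (Or.inl h)))))))))))))))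
    · exact Or.inr (Or.inr (Or.inr (Or.inr (Or.inr (Or.inr (Or.inr (Or.inr (Or.inr (Or.inr (Or.inr (Or.inr (Or.inr (Or.inr (Or.inr (Or.inr (h))))))))))))))))
    · exact Or.inr (Or.inr (Or.inl h))
    · exact Or.inl h
    · exact Or.inr (Or.inl h)
    · exact Or.inr (Or.inr (Or.inr (Or.inl h)))
    · exact Or.inr (Or.inr (Or.inr (Or.inr (Or.inl h))))
    · exact Or.inr (Or.inr (Or.inr (Or.inr (Or.inr (Or.inr (Or.inl h))))))
    · exact Or.inr (Or.inr (Or.inr (Or.inr (Or.inr (Or.inr (Or.inr (Or.inl h)))))))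
    · exact Or.inr (Or.inr (Or.inr (Or.inr (Or.inr (Or.inr (Or.inr (Or.inr (Or.inl h))))))))
    · exact Or.inr (Or.inr (Or.inr (Or.inr (Or.inr (Or.inr (Or.inr (Or.inr (Or.inr (Or.inl h)))))))))
    · exact Or.inr (Or.inr (Or.inr (Or.inr (Or.inr (Or.inr (Or.inr (Or.inr (Or.inr (Or.inr (Or.inl h))))))))))
    · exact Or.inr (Or.inr (Or.inr (Or.inr (Or.inr (Or.inr (Or.inr (Or.inr (Or.inr (Or.inr (Or.inr (Or.inl h)))))))))))
    · exact Or.inr (Or.inr (Or.inr (Or.inr (Or.inr (Or.inr (Or.inr (Or.inr (Or.inr (Or.inr (Or.inr (Or.inr (Or.inl h))))))))))))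
    · exact Or.inr (Or.inr (Or.inr (Or.inr (Or.inr (Or.inr (Or.inr (Or.inr (Or.inr (Or.inr (Or.inr (Or.inr (Or.inr (Or.inl h)))))))))))))

theorem pv_backup_any_eq (n ctx : List Char) :
    (pvBackupIndicators n).any (fun p => PySem.Chars.isIn p ctx) =
      (pvPairsOf pvBackupBefore pvBackupAfter).any
        (fun pa => PySem.Chars.isIn (pa.1 ++ n ++ pa.2) ctx) := by
  apply Bool.eq_iff_iff.mpr
  simp only [pvBackupIndicators, pvBackupBefore, pvBackupAfter, pvPairsOf, List.map,
    List.any_append, List.any_cons, List.any_nil, List.append_nil, List.nil_append,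
    Bool.or_eq_true, Bool.false_eq_true, or_false]
  constructor
  · rintro (h|h|h|h|h|h)
    · exact Or.inl (Or.inl h)
    · exact Or.inr (Or.inl h)
    · exact Or.inr (Or.inr (Or.inl h))
    · exact Or.inr (Or.inr (Or.inr (Or.inl h)))
    · exact Or.inl (Or.inr (h))
    · exact Or.inr (Or.inr (Or.inr (Or.inr (h))))
  · rintro ((h|h)|(h|h|h|h))
    · exact Or.inl h
    · exact Or.inr (Or.inr (Or.inr (Or.inr (Or.inl h))))
    · exact Or.inr (Or.inl h)
    · exact Or.inr (Or.inr (Or.inl h))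
    · exact Or.inr (Or.inr (Or.inr (Or.inl h)))
    · exact Or.inr (Or.inr (Or.inr (Or.inr (Or.inr (h)))))

-- per-position flags extracted from B's loop body
def pvSF (ctx name : List Char) (i : Nat) : Bool :=
  if PySem.Chars.slice ctx (some (i : Int)) (some ((i : Int) + (name.length : Int))) ≠ name then false
  else
    pvStarterBefore.any (fun p => PySem.Chars.endswith (PySem.Chars.slice ctx none (some (i : Int))) p) ||
    pvStarterAfter.any (fun s => PySem.Chars.startswith (PySem.Chars.slice ctx (some ((i : Int) + (name.length : Int))) none) s)

def pvBF (ctx name : List Char) (i : Nat) : Bool :=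
  if PySem.Chars.slice ctx (some (i : Int)) (some ((i : Int) + (name.length : Int))) ≠ name then false
  else
    pvBackupBefore.any (fun p => PySem.Chars.endswith (PySem.Chars.slice ctx none (some (i : Int))) p) ||
    pvBackupAfter.any (fun s => PySem.Chars.startswith (PySem.Chars.slice ctx (some ((i : Int) + (name.length : Int))) none) s)

theorem pvAltStep_eq (ctx name : List Char) (acc : Bool × Bool) (i : Nat) :
    pvAltStep ctx name acc i = (acc.1 || pvSF ctx name i, acc.2 || pvBF ctx name i) := by
  unfold pvAltStep pvSF pvBF
  simp only [PySem.Chars.slice_eq_listSlice]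
  by_cases h : PySem.List.slice ctx (some (i : Int)) (some ((i : Int) + (name.length : Int))) = name
  · simp [h]
  · simp [h]

theorem pv_foldl_or_pair (l : List Nat) (f g : Nat → Bool) (st : Bool × Bool) :
    l.foldl (fun acc i => (acc.1 || f i, acc.2 || g i)) st = (st.1 || l.any f, st.2 || l.any g) := by
  induction l generalizing st with
  | nil => simp
  | cons x xs ih => simp [List.foldl_cons, ih, Bool.or_assoc]

theorem pv_foldl_altStep (ctx name : List Char) (st : Bool × Bool) (l : List Nat) :
    l.foldl (pvAltStep ctx name) st = (st.1 || l.any (pvSF ctx name), st.2 || l.any (pvBF ctx name)) := by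
  rw [show pvAltStep ctx name = (fun acc i => (acc.1 || pvSF ctx name i, acc.2 || pvBF ctx name i)) from
    funext fun acc => funext fun i => pvAltStep_eq ctx name acc i]
  exact pv_foldl_or_pair l _ _ st

-- pvSF at i ≤ ctx.length says: the name occurs at i with a starter context
theorem pvSF_iff (ctx name : List Char) (i : Nat) :
    pvSF ctx name i = true ↔
      name <+: ctx.drop i ∧
        ((∃ p ∈ pvStarterBefore, p <:+ ctx.take i) ∨
         (∃ s ∈ pvStarterAfter, s <+: ctx.drop (i + name.length))) := by
  unfold pvSF
  rw [show ((i : Int) + (name.length : Int)) = ((i + name.length : Nat) : Int) by push_cast; ring]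
  simp only [PySem.Chars.slice_eq_listSlice, PySem.List.slice_natCast,
    PySem.List.slice_to_natCast, PySem.List.slice_from_natCast, Nat.add_sub_cancel_left]
  rw [List.prefix_iff_eq_take]
  by_cases h : name = (ctx.drop i).take name.length
  · rw [if_neg (by simp [← h]), Bool.or_eq_true]
    simp only [List.any_eq_true, PySem.Chars.endswith_iff, PySem.Chars.startswith_iff]
    exact (and_iff_right h).symm
  · rw [if_pos (by intro hc; exact h hc.symm)]
    simp [h]

theorem pvBF_iff (ctx name : List Char) (i : Nat) :
    pvBF ctx name i = true ↔
      name <+: ctx.drop i ∧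
        ((∃ p ∈ pvBackupBefore, p <:+ ctx.take i) ∨
         (∃ s ∈ pvBackupAfter, s <+: ctx.drop (i + name.length))) := by
  unfold pvBF
  rw [show ((i : Int) + (name.length : Int)) = ((i + name.length : Nat) : Int) by push_cast; ring]
  simp only [PySem.Chars.slice_eq_listSlice, PySem.List.slice_natCast,
    PySem.List.slice_to_natCast, PySem.List.slice_from_natCast, Nat.add_sub_cancel_left]
  rw [List.prefix_iff_eq_take]
  by_cases h : name = (ctx.drop i).take name.length
  · rw [if_neg (by simp [← h]), Bool.or_eq_true]
    simp only [List.any_eq_true, PySem.Chars.endswith_iff, PySem.Chars.startswith_iff]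
    exact (and_iff_right h).symm
  · rw [if_pos (by intro hc; exact h hc.symm)]
    simp [h]

-- A's early-return loop: some ret at the first match, none on fall-through
theorem pvScanReturn_eq_any (inds : List (List Char)) (ctx : List Char) (ret : Bool) :
    pvScanReturn inds ctx ret =
      (if inds.any (fun p => PySem.Chars.isIn p ctx) then some ret else none) := by
  induction inds with
  | nil => simp [pvScanReturn]
  | cons i rest ih =>
    show (if PySem.Chars.isIn i ctx then some ret else pvScanReturn rest ctx ret) = _
    by_cases h : PySem.Chars.isIn i ctx = true
    · rw [if_pos h, if_pos (by simp only [List.any_cons, h, Bool.true_or])]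
    · have hf : PySem.Chars.isIn i ctx = false := by
        revert h; cases PySem.Chars.isIn i ctx <;> simp
      have h' : ((i :: rest).any fun p => PySem.Chars.isIn p ctx)
          = (rest.any fun p => PySem.Chars.isIn p ctx) := by
        simp only [List.any_cons, hf, Bool.false_or]
      rw [if_neg h, ih, h']

-- A's whole-pattern search = B's positional sweep, starter side
theorem pv_flagS_eq (n ctx : List Char) :
    (pvStarterIndicators n).any (fun p => PySem.Chars.isIn p ctx) =
      (List.range (ctx.length + 1)).any (pvSF ctx n) := by
  rw [pv_starter_any_eq]
  apply Bool.eq_iff_iff.mpr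
  rw [pv_any_sandwich]
  simp only [List.any_eq_true, List.mem_range, pvSF_iff]
  constructor
  · rintro ⟨i, hi, hn, hpa⟩
    exact ⟨i, by omega, hn, (pv_mem_pairsOf _ _ _ _).mp hpa⟩
  · rintro ⟨i, hi, hn, hc⟩
    exact ⟨i, by omega, hn, (pv_mem_pairsOf _ _ _ _).mpr hc⟩

-- the same, backup side
theorem pv_flagB_eq (n ctx : List Char) :
    (pvBackupIndicators n).any (fun p => PySem.Chars.isIn p ctx) =
      (List.range (ctx.length + 1)).any (pvBF ctx n) := by
  rw [pv_backup_any_eq]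
  apply Bool.eq_iff_iff.mpr
  rw [pv_any_sandwich]
  simp only [List.any_eq_true, List.mem_range, pvBF_iff]
  constructor
  · rintro ⟨i, hi, hn, hpa⟩
    exact ⟨i, by omega, hn, (pv_mem_pairsOf _ _ _ _).mp hpa⟩
  · rintro ⟨i, hi, hn, hc⟩
    exact ⟨i, by omega, hn, (pv_mem_pairsOf _ _ _ _).mpr hc⟩

-- ===== VERDICT =====
theorem determine_starter_status_py_spec : Claim_equal_determine_starter_status_py := by
  intro player_name summary _
  unfold Spec_determine_starter_status_py determine_starter_status_py determine_starter_status_py_alt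
  simp only [pvScanReturn_eq_any, pv_foldl_altStep, Bool.false_or]
  rw [← pv_flagS_eq, ← pv_flagB_eq]
  by_cases hs : ((pvStarterIndicators (PySem.Chars.lower player_name.toList)).any
      (fun p => PySem.Chars.isIn p (PySem.Chars.lower summary.toList))) = true
  · rw [hs]; simp
  · rw [Bool.not_eq_true] at hs; rw [hs]
    by_cases hb : ((pvBackupIndicators (PySem.Chars.lower player_name.toList)).any
        (fun p => PySem.Chars.isIn p (PySem.Chars.lower summary.toList))) = true
    · rw [hb]; simp
    · rw [Bool.not_eq_true] at hb; rw [hb]; simp
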